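-- pv_equiv track=rewrite | github.com/waju893/lycee-overture | scripts/build_cardmeta_json.py | normalize_keyeffects
-- ===== SOURCE A (Python) =====
-- def normalize_keyeffects(value):
--     if not isinstance(value, list):
--         return []
--
--     result = []
--     seen = set()
--
--     for item in value:
--         if isinstance(item, int):
--             n = item
--         elif isinstance(item, str) and item.isdigit():
--             n = int(item)
--         else:
--             continue
--
--         # 11은 leader로 별도 처리하므로 keyeffects에서는 제외
--         if n == 11:
--             continue
--
--         if n not in seen:
--             result.append(n)
--             seen.add(n)
--
--     result.sort()
--     return result
-- ===== SOURCE B (Python) =====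
-- def normalize_keyeffects(value):
--     if not isinstance(value, list):
--         return []
--
--     # collect accepted values into a plain list (no set), sort, then
--     # dedup by adjacency in the sorted order
--     nums = []
--     for item in value:
--         if isinstance(item, int):
--             n = item
--         elif isinstance(item, str) and item.isdigit():
--             n = int(item)
--         else:
--             continue
--         if n != 11:
--             nums.append(n)
--
--     nums.sort()
--     out = []
--     for n in nums:
--         if not out or out[-1] != n:
--             out.append(n)
--     return out
-- ===== Notes on version B (the rewrite author's own statement) =====
-- stated objective: simpler
-- what changed: Drops the `seen` set entirely: collects accepted values into a plain list, sorts it, and removes duplicates by scanning for adjacent equal values instead of set-membership dedup before sorting.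
import Mathlib
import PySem

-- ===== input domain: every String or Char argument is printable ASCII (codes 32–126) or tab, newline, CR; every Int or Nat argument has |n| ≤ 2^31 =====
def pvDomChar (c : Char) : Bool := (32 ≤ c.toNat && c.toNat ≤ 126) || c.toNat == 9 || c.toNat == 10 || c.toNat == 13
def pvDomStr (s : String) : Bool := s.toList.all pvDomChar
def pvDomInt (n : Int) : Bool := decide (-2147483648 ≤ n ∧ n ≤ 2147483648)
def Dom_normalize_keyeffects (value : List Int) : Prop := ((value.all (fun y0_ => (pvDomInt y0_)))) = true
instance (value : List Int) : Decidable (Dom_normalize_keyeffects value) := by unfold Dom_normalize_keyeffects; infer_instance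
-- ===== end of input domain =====

-- B replaces A's first-occurrence dedup via a `seen` set with sort-then-adjacent-dedup: simpler (no auxiliary set).
-- (Under the Int-list type convention, A's `isinstance(item, str)` branch is unreachable.)

-- ===== PORT A =====
def normalize_keyeffects (value : List Int) : List Int :=
  let st := value.foldl
    (fun (acc : List Int × PySem.Set Int) n =>
      if n = 11 then acc
      else if n ∈ acc.2 then acc
      else (acc.1 ++ [n], acc.2.add n))
    ([], PySem.Set.ofList [])
  PySem.List.sorted st.1 id

-- ===== PORT B =====
def normalize_keyeffects_alt (value : List Int) : List Int :=
  let nums := PySem.List.sorted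
    (value.foldl (fun acc n => if n ≠ 11 then acc ++ [n] else acc) []) id
  nums.foldl (fun out n => if out.getLast? ≠ some n then out ++ [n] else out) []

-- ===== PRECONDITION & SPEC =====
def Spec_normalize_keyeffects (value : List Int) (out : List Int) : Prop := out = normalize_keyeffects_alt value
instance (value : List Int) (out : List Int) : Decidable (Spec_normalize_keyeffects value out) := by unfold Spec_normalize_keyeffects; infer_instance

-- ===== CLAIM (what is proved, stated in full; the proofs are below) =====
def Claim_equal_normalize_keyeffects : Prop := ∀ (value : List Int), Dom_normalize_keyeffects value → Spec_normalize_keyeffects value (normalize_keyeffects value)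

-- ===== LEMMAS AND PROOFS =====

-- every element of a strictly sorted list is ≤ its last element
theorem pv_le_getLast (l : List Int) (x y : Int) (h : l.Pairwise (· < ·))
    (hl : l.getLast? = some y) (hx : x ∈ l) : x ≤ y := by
  induction l with
  | nil => cases hx
  | cons a t ih =>
    cases t with
    | nil =>
      simp at hl hx; omega
    | cons b t' =>
      rw [List.getLast?_cons_cons] at hl
      rcases List.mem_cons.1 hx with rfl | hx'
      · have hb : y ∈ b :: t' := List.mem_of_getLast? hl
        have := (List.pairwise_cons.1 h).1 y hb
        omega
      · exact ih (List.pairwise_cons.1 h).2 hl hx'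

-- invariant for A's loop
theorem pvA_inv (l : List Int) (res : List Int) (seen : PySem.Set Int)
    (hs : ∀ x, x ∈ seen ↔ x ∈ res) (hn : res.Nodup) :
    (l.foldl (fun (acc : List Int × PySem.Set Int) n =>
      if n = 11 then acc
      else if n ∈ acc.2 then acc
      else (acc.1 ++ [n], acc.2.add n)) (res, seen)).1.Nodup ∧
    (∀ x, x ∈ (l.foldl (fun (acc : List Int × PySem.Set Int) n =>
      if n = 11 then acc
      else if n ∈ acc.2 then acc
      else (acc.1 ++ [n], acc.2.add n)) (res, seen)).1 ↔ x ∈ res ∨ (x ∈ l ∧ x ≠ 11)) := by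
  induction l generalizing res seen with
  | nil => exact ⟨hn, fun x => by simp⟩
  | cons a t ih =>
    simp only [List.foldl_cons]
    by_cases h11 : a = 11
    · rw [if_pos h11]
      obtain ⟨h1, h2⟩ := ih res seen hs hn
      refine ⟨h1, fun x => ?_⟩
      rw [h2 x]
      constructor
      · rintro (h | ⟨h, hne⟩)
        · exact Or.inl h
        · exact Or.inr ⟨List.mem_cons_of_mem _ h, hne⟩
      · rintro (h | ⟨h, hne⟩)
        · exact Or.inl h
        · rcases List.mem_cons.1 h with rfl | h'
          · exact absurd h11 hne
          · exact Or.inr ⟨h', hne⟩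
    · simp only [if_neg h11]
      by_cases hseen : a ∈ seen
      · simp only [if_pos hseen]
        obtain ⟨h1, h2⟩ := ih res seen hs hn
        refine ⟨h1, fun x => ?_⟩
        rw [h2 x]
        have ha : a ∈ res := (hs a).1 hseen
        constructor
        · rintro (h | ⟨h, hne⟩)
          · exact Or.inl h
          · exact Or.inr ⟨List.mem_cons_of_mem _ h, hne⟩
        · rintro (h | ⟨h, hne⟩)
          · exact Or.inl h
          · rcases List.mem_cons.1 h with rfl | h'
            · exact Or.inl ha
            · exact Or.inr ⟨h', hne⟩
      · simp only [if_neg hseen]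
        have hnotres : a ∉ res := fun h => hseen ((hs a).2 h)
        have hs' : ∀ x, x ∈ seen.add a ↔ x ∈ res ++ [a] := by
          intro x
          rw [PySem.Set.mem_add]
          simp [hs x]
        have hn' : (res ++ [a]).Nodup := by
          simp only [List.nodup_append, List.nodup_singleton, true_and, hn]
          intro a1 h1 a2 h2
          simp at h2
          subst h2
          exact fun he => hnotres (he ▸ h1)
        obtain ⟨h1, h2⟩ := ih (res ++ [a]) (seen.add a) hs' hn'
        refine ⟨h1, fun x => ?_⟩
        rw [h2 x]
        have hsing : ∀ y : Int, y ∈ res ++ [a] ↔ y ∈ res ∨ y = a := by intro y; simp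
        simp only [hsing, List.mem_cons]
        constructor
        · rintro ((h | rfl) | ⟨h, hne⟩)
          · exact Or.inl h
          · exact Or.inr ⟨Or.inl rfl, h11⟩
          · exact Or.inr ⟨Or.inr h, hne⟩
        · rintro (h | ⟨rfl | h, hne⟩)
          · exact Or.inl (Or.inl h)
          · exact Or.inl (Or.inr rfl)
          · exact Or.inr ⟨h, hne⟩

-- invariant for B's adjacent-dedup loop
theorem pvB_inv (nums acc : List Int)
    (hnums : nums.Pairwise (· ≤ ·)) (hacc : acc.Pairwise (· < ·))
    (hle : ∀ a ∈ acc, ∀ b ∈ nums, a ≤ b) :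
    (nums.foldl (fun out n => if out.getLast? ≠ some n then out ++ [n] else out) acc).Pairwise (· < ·) ∧
    (∀ x, x ∈ nums.foldl (fun out n => if out.getLast? ≠ some n then out ++ [n] else out) acc ↔
      x ∈ acc ∨ x ∈ nums) := by
  induction nums generalizing acc with
  | nil => exact ⟨hacc, fun x => by simp⟩
  | cons n t ih =>
    obtain ⟨hn_le, ht⟩ := List.pairwise_cons.1 hnums
    simp only [List.foldl_cons]
    by_cases hlast : acc.getLast? = some n
    · simp only [hlast, ne_eq, not_true_eq_false, if_false]
      have hle' : ∀ a ∈ acc, ∀ b ∈ t, a ≤ b := fun a ha b hb =>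
        hle a ha b (List.mem_cons_of_mem _ hb)
      obtain ⟨h1, h2⟩ := ih acc ht hacc hle'
      refine ⟨h1, fun x => ?_⟩
      rw [h2 x]
      have hmem : n ∈ acc := List.mem_of_getLast? hlast
      constructor
      · rintro (h | h)
        · exact Or.inl h
        · exact Or.inr (List.mem_cons_of_mem _ h)
      · rintro (h | h)
        · exact Or.inl h
        · rcases List.mem_cons.1 h with rfl | h'
          · exact Or.inl hmem
          · exact Or.inr h'
    · simp only [hlast, ne_eq, not_false_eq_true, if_true]
      have hlt : ∀ a ∈ acc, a < n := by
        intro a ha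
        cases hg : acc.getLast? with
        | none =>
          rw [List.getLast?_eq_none_iff] at hg
          subst hg; cases ha
        | some y =>
          have h1 : a ≤ y := pv_le_getLast acc a y hacc hg ha
          have h2 : y ≤ n := hle y (List.mem_of_getLast? hg) n (List.mem_cons_self ..)
          have h3 : y ≠ n := fun he => hlast (he ▸ hg)
          omega
      have hacc' : (acc ++ [n]).Pairwise (· < ·) := by
        rw [List.pairwise_append]
        exact ⟨hacc, List.pairwise_singleton _ _, fun a ha b hb => by
          simp at hb; subst hb; exact hlt a ha⟩
      have hle' : ∀ a ∈ acc ++ [n], ∀ b ∈ t, a ≤ b := by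
        intro a ha b hb
        rcases List.mem_append.1 ha with h | h
        · exact hle a h b (List.mem_cons_of_mem _ hb)
        · simp at h; subst h; exact hn_le b hb
      obtain ⟨h1, h2⟩ := ih (acc ++ [n]) ht hacc' hle'
      refine ⟨h1, fun x => ?_⟩
      rw [h2 x]
      simp only [List.mem_append, List.mem_cons]
      tauto

-- ===== VERDICT (by name: the statement is the Claim_ definition above) =====
theorem normalize_keyeffects_spec : Claim_equal_normalize_keyeffects := by
  intro value _
  unfold Spec_normalize_keyeffects normalize_keyeffects normalize_keyeffects_alt
  -- A's loop result
  obtain ⟨hAnodup, hAmem⟩ := pvA_inv value [] (PySem.Set.ofList [])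
    (fun x => by simp) List.nodup_nil
  set resA := (value.foldl (fun (acc : List Int × PySem.Set Int) n =>
      if n = 11 then acc
      else if n ∈ acc.2 then acc
      else (acc.1 ++ [n], acc.2.add n)) ([], PySem.Set.ofList [])).1 with hresA
  -- B's filtered list and its sort
  set fil := value.foldl (fun acc n => if n ≠ 11 then acc ++ [n] else acc) [] with hfil
  have hfil_eq : fil = (value.filter (fun n => decide (n ≠ 11))).map id := by
    rw [hfil]
    have := PySem.List.foldl_append_if (fun n => decide (n ≠ 11)) (id : Int → Int) value []
    simpa using this
  have hfilmem : ∀ x, x ∈ fil ↔ x ∈ value ∧ x ≠ 11 := by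
    intro x; rw [hfil_eq]; simp [List.mem_filter]
  set nums := PySem.List.sorted fil id with hnums
  have hnums_pair : nums.Pairwise (· ≤ ·) := PySem.List.sorted_pairwise fil id
  have hnums_mem : ∀ x, x ∈ nums ↔ x ∈ fil :=
    fun x => (PySem.List.sorted_perm fil id false).mem_iff
  -- B's dedup loop result
  obtain ⟨hBpair, hBmem⟩ := pvB_inv nums [] hnums_pair List.Pairwise.nil (by simp)
  set r := nums.foldl (fun out n => if out.getLast? ≠ some n then out ++ [n] else out) [] with hr
  -- r is a permutation of resA
  have hBnodup : r.Nodup := List.Pairwise.imp (fun h => Int.ne_of_lt h) hBpair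
  have hmem_eq : ∀ a, a ∈ r ↔ a ∈ resA := by
    intro a
    rw [hBmem a, hAmem a, hnums_mem a, hfilmem a]
  have hperm : r.Perm resA := (List.perm_ext_iff_of_nodup hBnodup hAnodup).2 hmem_eq
  exact PySem.List.sorted_eq_of_perm_of_pairwise_lt resA r id hperm hBpair
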